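-- pv_equiv track=rewrite | github.com/MiguelR90/katas | leetcode/medium-1234-replace-substr-balanced-str.py | min_length_substr_v2
-- ===== SOURCE A (Python) =====
-- from collections import Counter
--
-- def min_length_substr_v2(s: str) -> int:
--     target = len(s) // 4
--     totals = Counter(s)
--     excess = Counter({k: totals[k] - target for k in totals if totals[k] > target})
--
--     if not excess:
--         return 0
--
--     left = 0
--     counts: Counter[str] = Counter()
--     smallest = len(s)
--
--     for right in range(len(s)):
--         counts[s[right]] += 1
--
--         while excess <= counts:
--             smallest = min(smallest, right - left + 1)
--             counts[s[left]] -= 1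
--             left += 1
--
--     return smallest
-- ===== SOURCE B (Python) =====
-- from collections import Counter
--
--
-- def min_length_substr_v2(s: str) -> int:
--     # Binary search on the length L of the removed window; feasible(L) slides a
--     # fixed-size window of length L and asks whether some residual is balanced.
--     n = len(s)
--     target = n // 4
--     totals = Counter(s)
--
--     def feasible(L: int) -> bool:
--         window = Counter(s[:L])
--         if all(totals[c] - window[c] <= target for c in totals):
--             return True
--         for j in range(L, n):
--             window[s[j]] += 1
--             window[s[j - L]] -= 1
--             if all(totals[c] - window[c] <= target for c in totals):
--                 return True
--         return False
--
--     lo, hi = 0, n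
--     while lo < hi:
--         mid = (lo + hi) // 2
--         if feasible(mid):
--             hi = mid
--         else:
--             lo = mid + 1
--     return lo
-- ===== Notes on version B (the rewrite author's own statement) =====
-- stated objective: alternative
-- what changed: Replaces the two-pointer sliding-window minimisation with a binary search on the removed-window length L, where feasibility of a given L is decided by sliding a fixed-size window of length L and testing whether some residual count profile is balanced.
import Mathlib
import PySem

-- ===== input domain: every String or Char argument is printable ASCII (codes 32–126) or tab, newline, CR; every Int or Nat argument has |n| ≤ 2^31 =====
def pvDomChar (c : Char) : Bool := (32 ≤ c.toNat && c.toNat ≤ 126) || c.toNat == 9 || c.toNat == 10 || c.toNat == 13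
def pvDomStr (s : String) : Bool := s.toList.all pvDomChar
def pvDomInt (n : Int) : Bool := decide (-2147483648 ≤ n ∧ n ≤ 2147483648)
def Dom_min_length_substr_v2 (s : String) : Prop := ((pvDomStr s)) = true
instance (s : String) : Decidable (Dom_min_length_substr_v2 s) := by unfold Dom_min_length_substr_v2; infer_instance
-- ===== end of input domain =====

set_option maxRecDepth 8192

-- B replaces A's two-pointer sliding-window minimisation by a binary search on the
-- removed-window length, with a fixed-size sliding-window feasibility test (alternative
-- algorithm, not claimed faster).

-- ===== PORT A =====

-- Counter.__le__ (CPython): all(self[e] <= other[e] for c in (self, other) for e in c)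
def pyCounterLE (a b : PySem.Dict Char Int) : Bool :=
  (a.keys.all fun e => decide (a.getD e 0 ≤ b.getD e 0)) &&
  (b.keys.all fun e => decide (a.getD e 0 ≤ b.getD e 0))

-- the 'while excess <= counts' loop; state (left, counts, smallest); fuel bounds the
-- number of pops (each pop advances left, which never passes right + 1)
def aWhile (l : List Char) (excess : PySem.Dict Char Int) (right : Int) :
    Nat → Int × PySem.Dict Char Int × Int → Int × PySem.Dict Char Int × Int
  | 0, st => st
  | fuel + 1, (left, counts, smallest) =>
    if pyCounterLE excess counts then
      aWhile l excess right fuel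
        (left + 1, counts.modify (PySem.List.pyGetD l left ' ') 0 (· - 1),
         min smallest (right - left + 1))
    else (left, counts, smallest)

def min_length_substr_v2 (s : String) : Int :=
  let l := s.toList
  let target : Int := PySem.Int.floordiv (PySem.List.len l) 4
  let totals := PySem.Dict.counter l
  -- {k: totals[k] - target for k in totals if totals[k] > target}
  let excess : PySem.Dict Char Int :=
    totals.keys.foldl
      (fun d k =>
        if decide (target < totals.getD k 0) then d.insert k (totals.getD k 0 - target) else d)
      PySem.Dict.empty
  if excess.size = 0 then 0
  else
    let st :=
      (PySem.List.pyRange 0 (PySem.List.len l) 1).foldl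
        (fun (st : Int × PySem.Dict Char Int × Int) right =>
          aWhile l excess right (l.length + 1)
            (st.1, st.2.1.modify (PySem.List.pyGetD l right ' ') 0 (· + 1), st.2.2))
        (0, PySem.Dict.empty, PySem.List.len l)
    st.2.2

-- ===== PORT B =====

-- all(totals[c] - window[c] <= target for c in totals)
def bCheck (totals window : PySem.Dict Char Int) (target : Int) : Bool :=
  totals.keys.all fun c => decide (totals.getD c 0 - window.getD c 0 ≤ target)

-- the 'for j in range(L, n)' loop of feasible, with early return on success
def bSlide (l : List Char) (totals : PySem.Dict Char Int) (target L : Int) :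
    List Int → PySem.Dict Char Int → Bool
  | [], _ => false
  | j :: js, window =>
    let w := (window.modify (PySem.List.pyGetD l j ' ') 0 (· + 1)).modify
      (PySem.List.pyGetD l (j - L) ' ') 0 (· - 1)
    if bCheck totals w target then true else bSlide l totals target L js w

def bFeasible (l : List Char) (totals : PySem.Dict Char Int) (target L : Int) : Bool :=
  let window := PySem.Dict.counter (PySem.List.slice l none (some L))
  if bCheck totals window target then true
  else bSlide l totals target L (PySem.List.pyRange L (PySem.List.len l) 1) window

-- the binary-search loop 'while lo < hi'; fuel bounds the number of halvings
def bSearch (l : List Char) (totals : PySem.Dict Char Int) (target : Int) :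
    Nat → Int → Int → Int
  | 0, lo, _ => lo
  | fuel + 1, lo, hi =>
    if lo < hi then
      let mid := PySem.Int.floordiv (lo + hi) 2
      if bFeasible l totals target mid then bSearch l totals target fuel lo mid
      else bSearch l totals target fuel (mid + 1) hi
    else lo

def min_length_substr_v2_alt (s : String) : Int :=
  let l := s.toList
  let n := PySem.List.len l
  let target : Int := PySem.Int.floordiv n 4
  let totals := PySem.Dict.counter l
  bSearch l totals target (l.length + 1) 0 n

-- ===== PRECONDITION & SPEC =====
def Spec_min_length_substr_v2 (s : String) (out : Int) : Prop := out = min_length_substr_v2_alt s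
instance (s : String) (out : Int) : Decidable (Spec_min_length_substr_v2 s out) := by unfold Spec_min_length_substr_v2; infer_instance

-- ===== CLAIM (what is proved, stated in full; the proofs are below) =====
def Claim_equal_min_length_substr_v2 : Prop := ∀ (s : String), Dom_min_length_substr_v2 s → Spec_min_length_substr_v2 s (min_length_substr_v2 s)

-- ===== LEMMAS AND PROOFS =====

-- window s[i:j] of the character list
def pvWin (l : List Char) (i j : Nat) : List Char := (l.drop i).take (j - i)

-- the residual after removing window [i,j) is balanced (A's 'excess <= counts' content)
def pvCond (l : List Char) (t i j : Nat) : Prop :=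
  ∀ c : Char, l.count c ≤ (pvWin l i j).count c + t

-- some window of length m can be removed
def pvFeas (l : List Char) (t m : Nat) : Prop :=
  ∃ i, i + m ≤ l.length ∧ pvCond l t i (i + m)

lemma pvWin_count_mono (l : List Char) (c : Char) {i i' j j' : Nat}
    (hi : i' ≤ i) (hj : j ≤ j') :
    (pvWin l i j).count c ≤ (pvWin l i' j').count c := by
  rcases Nat.lt_or_ge i j with hji | hji
  swap
  · have h0 : j - i = 0 := by omega
    simp [pvWin, h0]
  unfold pvWin
  have h1 : l.drop i = (l.drop i').drop (i - i') := by
    rw [List.drop_drop]; congr 1; omega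
  rw [h1]
  apply List.Sublist.count_le
  have h2 : (((l.drop i').drop (i - i')).take (j - i)).Sublist
      ((l.drop i').take ((i - i') + (j - i))) := by
    rw [List.take_add]
    exact List.sublist_append_right _ _
  exact h2.trans (List.take_sublist_take_left (by omega))

lemma pvCond_mono {l : List Char} {t i i' j j' : Nat}
    (hi : i' ≤ i) (hj : j ≤ j') (h : pvCond l t i j) : pvCond l t i' j' := by
  intro c; exact le_trans (h c) (by have := pvWin_count_mono l c hi hj; omega)

lemma pvCond_full (l : List Char) (t : Nat) : pvCond l t 0 l.length := by
  intro c; simp [pvWin]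

lemma pvFeas_len (l : List Char) (t : Nat) : pvFeas l t l.length :=
  ⟨0, by simp, by simpa using pvCond_full l t⟩

lemma pvFeas_succ {l : List Char} {t m : Nat} (h : pvFeas l t m) (hm : m < l.length) :
    pvFeas l t (m + 1) := by
  rcases h with ⟨i, hin, hc⟩
  rcases Nat.lt_or_ge (i + m) l.length with hlt | hge
  · refine ⟨i, by omega, fun c => ?_⟩
    have := pvWin_count_mono l c (le_refl i) (show i + m ≤ i + (m+1) by omega)
    have := hc c; omega
  · have hi0 : 0 < i := by omega
    refine ⟨i - 1, by omega, fun c => ?_⟩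
    have := pvWin_count_mono l c (show i - 1 ≤ i by omega) (show i + m ≤ (i-1) + (m+1) by omega)
    have := hc c; omega

lemma pvFeas_mono {l : List Char} {t m m' : Nat} (h : pvFeas l t m) (hle : m ≤ m')
    (hm' : m' ≤ l.length) : pvFeas l t m' := by
  induction m' with
  | zero => have hm0 : m = 0 := by omega
            subst hm0; exact h
  | succ k ih =>
    rcases Nat.lt_or_ge m (k+1) with hlt | hge
    · exact pvFeas_succ (ih (by omega) (by omega)) (by omega)
    · have : m = k + 1 := by omega
      subst this; exact h

lemma pvWin_succ_right {l : List Char} {i j : Nat} (hij : i ≤ j) (hj : j < l.length) :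
    pvWin l i (j + 1) = pvWin l i j ++ [l[j]] := by
  unfold pvWin
  have h : j + 1 - i = (j - i) + 1 := by omega
  rw [h, List.take_add_one]
  congr 1
  have hlt : j - i < (l.drop i).length := by simp; omega
  rw [List.getElem?_eq_getElem hlt]
  simp [List.getElem_drop]
  congr 1
  omega

lemma pvWin_cons {l : List Char} {i j : Nat} (hij : i < j) (hi : i < l.length) :
    pvWin l i j = l[i] :: pvWin l (i + 1) j := by
  unfold pvWin
  rw [List.drop_eq_getElem_cons hi]
  have h : j - i = (j - (i+1)) + 1 := by omega
  rw [h, List.take_succ_cons]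

lemma pvWin_empty (l : List Char) (i : Nat) : pvWin l i i = [] := by
  simp [pvWin]

-- a nonempty excess kills the empty window
lemma pvCond_not_empty {l : List Char} {t : Nat} (hu : ∃ c ∈ l, t < l.count c) (i : Nat) :
    ¬ pvCond l t i i := by
  rcases hu with ⟨c, _, hc⟩
  intro h
  have := h c
  rw [pvWin_empty] at this
  simp at this; omega

-- ---- dict bridge: the excess dict built by A ----

lemma excess_items (l : List Char) (target : Int) :
    ((PySem.Dict.counter l).keys.foldl
      (fun d k => if decide (target < (PySem.Dict.counter l).getD k 0) then
          d.insert k ((PySem.Dict.counter l).getD k 0 - target) else d)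
      PySem.Dict.empty).items =
    ((PySem.Dict.counter l).keys.filter
        (fun k => decide (target < (PySem.Dict.counter l).getD k 0))).map
      (fun k => (k, (PySem.Dict.counter l).getD k 0 - target)) := by
  rw [PySem.List.foldl_if_eq_foldl_filter]
  have h := PySem.Dict.items_foldl_insert_fresh
    (l := (PySem.Dict.counter l).keys.filter
      (fun k => decide (target < (PySem.Dict.counter l).getD k 0)))
    (k := fun a => a) (v := fun k => (PySem.Dict.counter l).getD k 0 - target)
    PySem.Dict.empty (fun a _ => by simp)
    (by simpa using ((PySem.Dict.nodup_keys_counter l).filter _))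
  simpa using h

lemma excess_size_zero_iff (l : List Char) (target : Int) :
    (((PySem.Dict.counter l).keys.foldl
      (fun d k => if decide (target < (PySem.Dict.counter l).getD k 0) then
          d.insert k ((PySem.Dict.counter l).getD k 0 - target) else d)
      PySem.Dict.empty).size = 0) ↔ (∀ c ∈ l, (l.count c : Int) ≤ target) := by
  show (PySem.Dict.items _).length = 0 ↔ _
  rw [excess_items]
  simp [List.filter_eq_nil_iff, PySem.Dict.keys_counter, PySem.Set.mem_ofList,
    PySem.Dict.getD_counter]

lemma excess_keys (l : List Char) (target : Int) :
    ((PySem.Dict.counter l).keys.foldl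
      (fun d k => if decide (target < (PySem.Dict.counter l).getD k 0) then
          d.insert k ((PySem.Dict.counter l).getD k 0 - target) else d)
      PySem.Dict.empty).keys =
    ((PySem.Dict.counter l).keys.filter
        (fun k => decide (target < (PySem.Dict.counter l).getD k 0))) := by
  show (PySem.Dict.items _).map _ = _
  rw [excess_items]
  simp [Function.comp_def]

lemma mem_excess_keys (l : List Char) (target : Int) (c : Char) :
    c ∈ ((PySem.Dict.counter l).keys.foldl
      (fun d k => if decide (target < (PySem.Dict.counter l).getD k 0) then
          d.insert k ((PySem.Dict.counter l).getD k 0 - target) else d)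
      PySem.Dict.empty).keys ↔ (c ∈ l ∧ target < (l.count c : Int)) := by
  rw [excess_keys]
  simp [PySem.Dict.keys_counter, PySem.Set.mem_ofList, PySem.Dict.getD_counter]

lemma excess_getD (l : List Char) (target : Int) (c : Char)
    (hc : c ∈ l) (ht : target < (l.count c : Int)) :
    ((PySem.Dict.counter l).keys.foldl
      (fun d k => if decide (target < (PySem.Dict.counter l).getD k 0) then
          d.insert k ((PySem.Dict.counter l).getD k 0 - target) else d)
      PySem.Dict.empty).getD c 0 = (l.count c : Int) - target := by
  set d := ((PySem.Dict.counter l).keys.foldl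
      (fun d k => if decide (target < (PySem.Dict.counter l).getD k 0) then
          d.insert k ((PySem.Dict.counter l).getD k 0 - target) else d)
      PySem.Dict.empty) with hd
  have hmem : (c, (l.count c : Int) - target) ∈ d.items := by
    rw [hd, excess_items]
    simp [List.mem_filter, PySem.Dict.keys_counter, PySem.Set.mem_ofList,
      PySem.Dict.getD_counter]
    exact ⟨hc, ht⟩
  have hnd : d.keys.Nodup := by
    rw [hd, excess_keys]
    exact (PySem.Dict.nodup_keys_counter l).filter _
  exact PySem.Dict.getD_of_mem_items d hmem hnd 0

lemma excess_getD_zero (l : List Char) (target : Int) (c : Char)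
    (hc : ¬ (c ∈ l ∧ target < (l.count c : Int))) :
    ((PySem.Dict.counter l).keys.foldl
      (fun d k => if decide (target < (PySem.Dict.counter l).getD k 0) then
          d.insert k ((PySem.Dict.counter l).getD k 0 - target) else d)
      PySem.Dict.empty).getD c 0 = 0 := by
  apply PySem.Dict.getD_of_not_contains
  rw [← Bool.not_eq_true, PySem.Dict.contains_iff_mem_keys, mem_excess_keys]
  exact hc

-- A's while condition, read through a counts dict that tracks a window
lemma pyCounterLE_iff (l : List Char) (t : Nat) (counts : PySem.Dict Char Int)
    {i j : Nat} (htrack : ∀ c, counts.getD c 0 = ((pvWin l i j).count c : Int)) :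
    pyCounterLE
      ((PySem.Dict.counter l).keys.foldl
        (fun d k => if decide ((t : Int) < (PySem.Dict.counter l).getD k 0) then
            d.insert k ((PySem.Dict.counter l).getD k 0 - (t : Int)) else d)
        PySem.Dict.empty) counts = true ↔ (∀ c : Char, l.count c ≤ (pvWin l i j).count c + t) := by
  unfold pyCounterLE
  rw [Bool.and_eq_true, List.all_eq_true, List.all_eq_true]
  constructor
  · rintro ⟨h1, _⟩ c
    by_cases hce : c ∈ l ∧ (t : Int) < (l.count c : Int)
    · have hc := (mem_excess_keys l (t : Int) c).mpr hce
      have h2 := h1 c hc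
      rw [excess_getD l (t : Int) c hce.1 hce.2, htrack c] at h2
      simp at h2
      omega
    · by_cases hcl : c ∈ l
      · have hnt : ¬ ((t : Int) < (l.count c : Int)) := fun hx => hce ⟨hcl, hx⟩
        have hcount : 0 ≤ (pvWin l i j).count c := Nat.zero_le _
        omega
      · have : l.count c = 0 := List.count_eq_zero.mpr hcl
        omega
  · intro h
    have key : ∀ e, ((PySem.Dict.counter l).keys.foldl
        (fun d k => if decide ((t : Int) < (PySem.Dict.counter l).getD k 0) then
            d.insert k ((PySem.Dict.counter l).getD k 0 - (t : Int)) else d)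
        PySem.Dict.empty).getD e 0 ≤ counts.getD e 0 := by
      intro e
      rw [htrack e]
      by_cases he : e ∈ l ∧ (t : Int) < (l.count e : Int)
      · rw [excess_getD l (t : Int) e he.1 he.2]
        have := h e
        omega
      · rw [excess_getD_zero l (t : Int) e he]
        positivity
    exact ⟨fun e _ => by simpa using key e, fun e _ => by simpa using key e⟩

-- B's residual check, read through a window dict that tracks a window
lemma bCheck_iff (l : List Char) (t : Nat) (window : PySem.Dict Char Int)
    {i j : Nat} (htrack : ∀ c, window.getD c 0 = ((pvWin l i j).count c : Int)) :
    bCheck (PySem.Dict.counter l) window (t : Int) = true ↔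
      (∀ c : Char, l.count c ≤ (pvWin l i j).count c + t) := by
  unfold bCheck
  rw [List.all_eq_true]
  constructor
  · intro h c
    by_cases hcl : c ∈ l
    · have := h c (by rw [PySem.Dict.keys_counter]; exact (PySem.Set.mem_ofList _ _).mpr hcl)
      rw [PySem.Dict.getD_counter, htrack c] at this
      simp at this
      omega
    · have : l.count c = 0 := List.count_eq_zero.mpr hcl
      omega
  · intro h c hc
    rw [PySem.Dict.keys_counter] at hc
    have := h c
    simp [PySem.Dict.getD_counter, htrack c]
    omega

-- ---- A's loop ----

-- invariant after processing rights 0..p-1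
def AInv (l : List Char) (t p : Nat) (st : Int × PySem.Dict Char Int × Int) : Prop :=
  ∃ L S : Nat,
    st.1 = (L : Int) ∧ st.2.2 = (S : Int) ∧ L ≤ p ∧
    (∀ c, st.2.1.getD c 0 = ((pvWin l L p).count c : Int)) ∧
    ¬ pvCond l t L p ∧
    sInf {m | pvFeas l t m} ≤ S ∧ S ≤ l.length ∧
    (∀ i j, i < L → i ≤ j → j ≤ l.length → pvCond l t i j → S ≤ j - i)

lemma aWhile_spec (l : List Char) (t : Nat) (hu : ∃ c ∈ l, t < l.count c)
    (p : Nat) (hp : p < l.length) :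
    ∀ (fuel L S : Nat) (counts : PySem.Dict Char Int),
    L ≤ p + 1 →
    (∀ c, counts.getD c 0 = ((pvWin l L (p + 1)).count c : Int)) →
    p + 1 ≤ fuel + L →
    sInf {m | pvFeas l t m} ≤ S → S ≤ l.length →
    (∀ i j, i < L → i ≤ j → j ≤ l.length → pvCond l t i j → S ≤ j - i) →
    (∀ e, e ≤ p → ¬ pvCond l t L e) →
    AInv l t (p + 1)
      (aWhile l
        ((PySem.Dict.counter l).keys.foldl
          (fun d k => if decide ((t : Int) < (PySem.Dict.counter l).getD k 0) then
              d.insert k ((PySem.Dict.counter l).getD k 0 - (t : Int)) else d)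
          PySem.Dict.empty)
        (p : Int) fuel ((L : Int), counts, (S : Int))) := by
  intro fuel
  induction fuel with
  | zero =>
    intro L S counts hL htrack hfuel hS1 hS2 hH5 hHh
    have hLp : L = p + 1 := by omega
    simp only [aWhile]
    exact ⟨L, S, rfl, rfl, by omega, htrack, by rw [hLp]; exact pvCond_not_empty hu _,
      hS1, hS2, hH5⟩
  | succ fuel ih =>
    intro L S counts hL htrack hfuel hS1 hS2 hH5 hHh
    simp only [aWhile]
    by_cases hC : pyCounterLE
        ((PySem.Dict.counter l).keys.foldl
          (fun d k => if decide ((t : Int) < (PySem.Dict.counter l).getD k 0) then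
              d.insert k ((PySem.Dict.counter l).getD k 0 - (t : Int)) else d)
          PySem.Dict.empty) counts = true
    · rw [if_pos hC]
      have hcond := (pyCounterLE_iff l t counts htrack).mp hC
      have hLle : L ≤ p := by
        by_contra hgt
        have hLp : L = p + 1 := by omega
        exact pvCond_not_empty hu (p+1) (by rw [hLp] at hcond; exact hcond)
      have hLn : L < l.length := by omega
      have e1 : ((L : Int) + 1) = ((L + 1 : Nat) : Int) := by push_cast; ring
      have e2 : PySem.List.pyGetD l (L : Int) ' ' = l[L] := by
        rw [PySem.List.pyGetD_natCast]
        exact List.getD_eq_getElem l ' ' hLn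
      have e3 : min (S : Int) ((p : Int) - (L : Int) + 1) = ((min S (p + 1 - L) : Nat) : Int) := by
        omega
      rw [e1, e2, e3]
      have hw : pvWin l L (p+1) = l[L] :: pvWin l (L+1) (p+1) := pvWin_cons (by omega) hLn
      apply ih
      · omega
      · intro c
        rw [PySem.Dict.getD_modify]
        by_cases hc : c = l[L]
        · rw [if_pos hc, hc, htrack, hw]
          simp
        · rw [if_neg hc, htrack, hw]
          have : (l[L] == c) = false := by
            simp; intro h; exact hc h.symm
          simp [List.count_cons, this]
      · omega
      · refine Nat.le_min.mpr ⟨hS1, Nat.sInf_le ?_⟩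
        refine ⟨L, by omega, ?_⟩
        have harith : L + (p + 1 - L) = p + 1 := by omega
        rw [harith]
        exact hcond
      · omega
      · intro i j hi hij hjn hcnd
        rcases Nat.lt_or_ge i L with hiL | hiL
        · have := hH5 i j hiL hij hjn hcnd
          omega
        · have hiL' : i = L := by omega
          subst hiL'
          rcases Nat.lt_or_ge p j with hpj | hpj
          · omega
          · exact absurd hcnd (hHh j (by omega))
      · intro e he hcnd
        exact hHh e he (pvCond_mono (by omega) (le_refl e) hcnd)
    · rw [if_neg hC]
      exact ⟨L, S, rfl, rfl, by omega, htrack,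
        fun hcnd => hC ((pyCounterLE_iff l t counts htrack).mpr hcnd), hS1, hS2, hH5⟩

lemma aLoop_spec (l : List Char) (t : Nat) (hu : ∃ c ∈ l, t < l.count c) :
    ∀ (p : Nat), p ≤ l.length →
    AInv l t p
      ((PySem.List.pyRange 0 (p : Int) 1).foldl
        (fun (st : Int × PySem.Dict Char Int × Int) right =>
          aWhile l
            ((PySem.Dict.counter l).keys.foldl
              (fun d k => if decide ((t : Int) < (PySem.Dict.counter l).getD k 0) then
                  d.insert k ((PySem.Dict.counter l).getD k 0 - (t : Int)) else d)
              PySem.Dict.empty)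
            right (l.length + 1)
            (st.1, st.2.1.modify (PySem.List.pyGetD l right ' ') 0 (· + 1), st.2.2))
        (0, PySem.Dict.empty, (l.length : Int))) := by
  intro p
  induction p with
  | zero =>
    intro _
    rw [show ((0:Nat) : Int) = 0 by norm_num, PySem.List.pyRange_one_eq_nil (by omega)]
    refine ⟨0, l.length, by norm_num, rfl, le_refl 0, ?_, pvCond_not_empty hu 0,
      Nat.sInf_le (pvFeas_len l t), le_refl _, by omega⟩
    intro c
    simp [pvWin_empty, PySem.Dict.getD_empty]
  | succ p ihp =>
    intro hp
    have hInv := ihp (by omega)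
    have hsplit : ((p + 1 : Nat) : Int) = (p : Int) + 1 := by push_cast; ring
    rw [hsplit, PySem.List.pyRange_one_succ_right (by positivity), List.foldl_append]
    obtain ⟨L, S, h1, h2, hL, htr, hnc, hs1, hs2, h5⟩ := hInv
    simp only [List.foldl_cons, List.foldl_nil]
    rw [h1, h2]
    have hpn : p < l.length := by omega
    have e2 : PySem.List.pyGetD l (p : Int) ' ' = l[p] := by
      rw [PySem.List.pyGetD_natCast]
      exact List.getD_eq_getElem l ' ' hpn
    rw [e2]
    have hw : pvWin l L (p+1) = pvWin l L p ++ [l[p]] := pvWin_succ_right hL hpn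
    apply aWhile_spec l t hu p hpn
    · omega
    · intro c
      rw [PySem.Dict.getD_modify]
      by_cases hc : c = l[p]
      · rw [if_pos hc, hc, htr, hw]
        simp
      · rw [if_neg hc, htr, hw]
        have hzero : List.count c [l[p]] = 0 := by
          rw [List.count_eq_zero]
          simpa using fun h : c = l[p] => hc h
        simp [List.count_append, hzero]
    · omega
    · exact hs1
    · exact hs2
    · exact h5
    · intro e he hcnd
      exact hnc (pvCond_mono (le_refl L) he hcnd)

lemma a_eq_sInf (s : String) :
    min_length_substr_v2 s =
      ((sInf {m | pvFeas s.toList (s.toList.length / 4) m} : Nat) : Int) := by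
  unfold min_length_substr_v2
  set l := s.toList with hl
  set t := l.length / 4 with ht
  have htar : PySem.Int.floordiv ((l.length : Nat) : Int) 4 = ((t : Nat) : Int) := by
    rw [ht]
    exact_mod_cast PySem.Int.floordiv_natCast l.length 4
  simp only [PySem.List.len_eq, htar]
  by_cases hbal : ∀ c ∈ l, (l.count c : Int) ≤ (t : Int)
  · rw [if_pos ((excess_size_zero_iff l (t : Int)).mpr hbal)]
    have h0 : pvFeas l t 0 := by
      refine ⟨0, by omega, fun c => ?_⟩
      rw [Nat.add_zero, pvWin_empty]
      by_cases hc : c ∈ l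
      · have := hbal c hc
        simp only [List.count_nil]
        omega
      · have : l.count c = 0 := List.count_eq_zero.mpr hc
        omega
    have hz : sInf {m | pvFeas l t m} = 0 := Nat.le_zero.mp (Nat.sInf_le h0)
    rw [hz]
    norm_num
  · rw [if_neg (fun hzq => hbal ((excess_size_zero_iff l (t : Int)).mp hzq))]
    have hu : ∃ c ∈ l, t < l.count c := by
      push Not at hbal
      obtain ⟨c, hc, hcount⟩ := hbal
      exact ⟨c, hc, by exact_mod_cast hcount⟩
    obtain ⟨L, S, h1, h2, hL, htr, hnc, hs1, hs2, h5⟩ :=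
      aLoop_spec l t hu l.length (le_refl _)
    rw [h2]
    have hne : {m | pvFeas l t m}.Nonempty := ⟨l.length, pvFeas_len l t⟩
    obtain ⟨i0, hi0, hc0⟩ := Nat.sInf_mem hne
    have hSle : S ≤ sInf {m | pvFeas l t m} := by
      rcases Nat.lt_or_ge i0 L with hiL | hiL
      · have := h5 i0 (i0 + sInf {m | pvFeas l t m}) hiL (by omega) hi0 hc0
        omega
      · exact absurd (pvCond_mono hiL hi0 hc0) hnc
    have : S = sInf {m | pvFeas l t m} := by omega
    rw [this]

-- ---- B's loops ----

lemma getD_modify_pm (d : PySem.Dict Char Int) (x y c : Char) :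
    ((d.modify x 0 (· + 1)).modify y 0 (· - 1)).getD c 0 =
      d.getD c 0 + (if x = c then 1 else 0) - (if y = c then 1 else 0) := by
  rw [PySem.Dict.getD_modify]
  by_cases h1 : c = y
  · rw [if_pos h1, PySem.Dict.getD_modify]
    by_cases h2 : c = x
    · rw [if_pos (h1.symm.trans h2), if_pos h2.symm, if_pos h1.symm]
      rw [show d.getD x 0 = d.getD c 0 from by rw [h2]]
    · rw [if_neg (fun hyx => h2 (h1.trans hyx)), if_neg (fun hxc => h2 hxc.symm), if_pos h1.symm]
      rw [show d.getD y 0 = d.getD c 0 from by rw [h1]]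
      ring
  · rw [if_neg h1, PySem.Dict.getD_modify]
    by_cases h2 : c = x
    · rw [if_pos h2, if_pos h2.symm, if_neg (fun hyc => h1 hyc.symm)]
      rw [show d.getD x 0 = d.getD c 0 from by rw [h2]]
      ring
    · rw [if_neg h2, if_neg (fun hxc => h2 hxc.symm), if_neg (fun hyc => h1 hyc.symm)]
      ring


lemma bSlide_spec (l : List Char) (t : Nat) (M : Nat) (hM : M ≤ l.length) :
    ∀ (J : Nat) (window : PySem.Dict Char Int), M ≤ J → J ≤ l.length →
    (∀ c, window.getD c 0 = ((pvWin l (J - M) J).count c : Int)) →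
    (bSlide l (PySem.Dict.counter l) (t : Int) (M : Int)
        (PySem.List.pyRange (J : Int) (l.length : Int) 1) window = true ↔
      ∃ i, J - M < i ∧ i + M ≤ l.length ∧ pvCond l t i (i + M)) := by
  intro J window hMJ hJn htrack
  generalize hk : l.length - J = k
  induction k generalizing J window with
  | zero =>
    have hJ : J = l.length := by omega
    rw [PySem.List.pyRange_one_eq_nil (by exact_mod_cast Nat.le_of_eq hJ.symm)]
    simp only [bSlide]
    constructor
    · intro h; cases h
    · rintro ⟨i, h1, h2, _⟩
      omega
  | succ k ih =>
    have hJlt : J < l.length := by omega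
    rw [PySem.List.pyRange_one_cons (by exact_mod_cast hJlt)]
    simp only [bSlide]
    have e2 : PySem.List.pyGetD l (J : Int) ' ' = l[J] := by
      rw [PySem.List.pyGetD_natCast]
      exact List.getD_eq_getElem l ' ' hJlt
    have e3 : (J : Int) - (M : Int) = ((J - M : Nat) : Int) := by omega
    have e4 : PySem.List.pyGetD l ((J - M : Nat) : Int) ' ' = l[J - M] := by
      rw [PySem.List.pyGetD_natCast]
      exact List.getD_eq_getElem l ' ' (by omega)
    rw [e2, e3, e4]
    have hcount : ∀ c, ((pvWin l (J + 1 - M) (J + 1)).count c : Int) =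
        ((pvWin l (J - M) J).count c : Int) + (if l[J] = c then 1 else 0) -
          (if l[J - M] = c then 1 else 0) := by
      intro c
      have e5 : pvWin l (J - M) (J + 1) = pvWin l (J - M) J ++ [l[J]] :=
        pvWin_succ_right (by omega) hJlt
      have e6 : pvWin l (J - M) (J + 1) = [l[J - M]] ++ pvWin l ((J - M) + 1) (J + 1) := by
        rw [List.singleton_append]
        exact pvWin_cons (by omega) (by omega)
      have e7 : J + 1 - M = (J - M) + 1 := by omega
      have h := congrArg (List.count c) (e5.symm.trans e6)
      simp only [List.count_append, List.count_singleton] at h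
      rw [e7]
      by_cases hc1 : l[J - M] = c <;> by_cases hc2 : l[J] = c <;>
        simp only [hc1, hc2, beq_iff_eq] at h ⊢ <;>
        simp at h ⊢ <;> omega
    have htrack' : ∀ c,
        ((window.modify l[J] 0 (· + 1)).modify l[J - M] 0 (· - 1)).getD c 0 =
          ((pvWin l (J + 1 - M) (J + 1)).count c : Int) := by
      intro c
      rw [getD_modify_pm, htrack, hcount c]
    by_cases hchk : bCheck (PySem.Dict.counter l) ((window.modify l[J] 0 (· + 1)).modify l[J - M] 0 (· - 1)) (t : Int) = true
    · rw [if_pos hchk]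
      have hcond := (bCheck_iff l t _ htrack').mp hchk
      refine iff_of_true rfl ⟨J + 1 - M, by omega, by omega, ?_⟩
      have e8 : (J + 1 - M) + M = J + 1 := by omega
      rw [e8]
      exact hcond
    · rw [if_neg hchk]
      have hJ1 : ((J : Int) + 1) = ((J + 1 : Nat) : Int) := by push_cast; ring
      rw [hJ1, ih (J + 1) _ (by omega) (by omega) htrack' (by omega)]
      constructor
      · rintro ⟨i, h1, h2, h3⟩
        exact ⟨i, by omega, h2, h3⟩
      · rintro ⟨i, h1, h2, h3⟩
        rcases Nat.lt_or_ge (J + 1 - M) i with hgt | hge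
        · exact ⟨i, hgt, h2, h3⟩
        · have hieq : i = J + 1 - M := by omega
          subst hieq
          exfalso
          apply hchk
          apply (bCheck_iff l t _ htrack').mpr
          have e8 : (J + 1 - M) + M = J + 1 := by omega
          rw [e8] at h3
          exact h3

lemma bFeasible_iff (l : List Char) (t : Nat) (M : Nat) (hM : M ≤ l.length) :
    (bFeasible l (PySem.Dict.counter l) (t : Int) (M : Int) = true ↔ pvFeas l t M) := by
  unfold bFeasible
  have hsl : PySem.List.slice l none (some (M : Int)) = l.take M :=
    PySem.List.slice_to_natCast l M
  rw [hsl]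
  have htrack0 : ∀ c, (PySem.Dict.counter (l.take M)).getD c 0 =
      ((pvWin l 0 M).count c : Int) := by
    intro c
    rw [PySem.Dict.getD_counter]
    simp [pvWin]
  by_cases hchk : bCheck (PySem.Dict.counter l) (PySem.Dict.counter (l.take M)) (t : Int) = true
  · rw [if_pos hchk]
    refine iff_of_true rfl ⟨0, by omega, ?_⟩
    have := (bCheck_iff l t _ htrack0).mp hchk
    simpa using this
  · rw [if_neg hchk]
    rw [PySem.List.len_eq]
    rw [bSlide_spec l t M hM M (PySem.Dict.counter (l.take M)) (le_refl M) hM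
      (by simpa [Nat.sub_self] using htrack0)]
    constructor
    · rintro ⟨i, _, h2, h3⟩
      exact ⟨i, h2, h3⟩
    · rintro ⟨i, h2, h3⟩
      rcases Nat.lt_or_ge (M - M) i with hgt | hge
      · exact ⟨i, hgt, h2, h3⟩
      · have hi0 : i = 0 := by omega
        subst hi0
        exfalso
        apply hchk
        apply (bCheck_iff l t _ htrack0).mpr
        simpa using h3

lemma bSearch_spec (l : List Char) (t : Nat) :
    ∀ (fuel LO HI : Nat), LO ≤ HI → HI ≤ l.length →
    (∀ m, m < LO → ¬ pvFeas l t m) → pvFeas l t HI → HI ≤ LO + fuel →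
    bSearch l (PySem.Dict.counter l) (t : Int) fuel (LO : Int) (HI : Int) =
      ((sInf {m | pvFeas l t m} : Nat) : Int) := by
  intro fuel
  induction fuel with
  | zero =>
    intro LO HI hle hHn hlo hFHI hfuel
    have hw : LO = HI := by omega
    simp only [bSearch]
    subst hw
    have hne : {m | pvFeas l t m}.Nonempty := ⟨LO, hFHI⟩
    congr 1
    refine Nat.le_antisymm ?_ (Nat.sInf_le hFHI)
    rcases Nat.lt_or_ge (sInf {m | pvFeas l t m}) LO with hlt | hge
    · exact absurd (Nat.sInf_mem hne) (hlo _ hlt)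
    · omega
  | succ fuel ih =>
    intro LO HI hle hHn hlo hFHI hfuel
    simp only [bSearch]
    by_cases hlt : LO < HI
    · rw [if_pos (by exact_mod_cast hlt)]
      have hcast : ((LO : Int) + (HI : Int)) = ((LO + HI : Nat) : Int) := by push_cast; ring
      have hmid : PySem.Int.floordiv ((LO : Int) + (HI : Int)) 2 =
          (((LO + HI) / 2 : Nat) : Int) := by
        rw [hcast]
        exact_mod_cast PySem.Int.floordiv_natCast (LO + HI) 2
      rw [hmid]
      have hMDlt : (LO + HI) / 2 < HI := by omega
      have hMDge : LO ≤ (LO + HI) / 2 := by omega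
      by_cases hfe : bFeasible l (PySem.Dict.counter l) (t : Int) (((LO + HI) / 2 : Nat) : Int) = true
      · rw [if_pos hfe]
        exact ih LO ((LO + HI) / 2) hMDge (by omega) hlo
          ((bFeasible_iff l t _ (by omega)).mp hfe) (by omega)
      · rw [if_neg hfe]
        have hpush : (((LO + HI) / 2 : Nat) : Int) + 1 = (((LO + HI) / 2 + 1 : Nat) : Int) := by
          push_cast; ring
        rw [hpush]
        refine ih ((LO + HI) / 2 + 1) HI (by omega) hHn ?_ hFHI (by omega)
        intro m hm
        rcases Nat.lt_or_ge m LO with hmlo | hmlo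
        · exact hlo m hmlo
        · intro hfm
          exact hfe ((bFeasible_iff l t _ (by omega)).mpr
            (pvFeas_mono hfm (by omega) (by omega)))
    · rw [if_neg (by exact_mod_cast hlt)]
      have hw : LO = HI := by omega
      subst hw
      have hne : {m | pvFeas l t m}.Nonempty := ⟨LO, hFHI⟩
      congr 1
      refine Nat.le_antisymm ?_ (Nat.sInf_le hFHI)
      rcases Nat.lt_or_ge (sInf {m | pvFeas l t m}) LO with hl2 | hge
      · exact absurd (Nat.sInf_mem hne) (hlo _ hl2)
      · omega

lemma b_eq_sInf (s : String) :
    min_length_substr_v2_alt s =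
      ((sInf {m | pvFeas s.toList (s.toList.length / 4) m} : Nat) : Int) := by
  unfold min_length_substr_v2_alt
  set l := s.toList with hl
  set t := l.length / 4 with ht
  have htar : PySem.Int.floordiv ((l.length : Nat) : Int) 4 = ((t : Nat) : Int) := by
    rw [ht]
    exact_mod_cast PySem.Int.floordiv_natCast l.length 4
  simp only [PySem.List.len_eq, htar]
  have h0 : ((0 : Nat) : Int) = (0 : Int) := by norm_num
  rw [← h0]
  exact bSearch_spec l t (l.length + 1) 0 l.length (by omega) (le_refl _)
    (by omega) (pvFeas_len l t) (by omega)

-- ===== VERDICT (by name: the statement is the Claim_ definition above) =====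
theorem min_length_substr_v2_spec : Claim_equal_min_length_substr_v2 := by
  intro s _
  unfold Spec_min_length_substr_v2
  rw [a_eq_sInf, b_eq_sInf]
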